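-- pv_equiv track=rewrite | github.com/Innokentii-Smirnov/NeuralCanonicalSegmentation | src/library/brackets.py | find_with_brack_balance
-- ===== SOURCE A (Python) =====
-- def find_with_brack_balance(string: str, symbol: str,
--                                  opening: str, closing: str):
--     results = []
--     balance = 0
--     for i, x in enumerate(string):
--         if x == opening:
--             balance += 1
--         elif x == closing:
--             balance -= 1
--         elif x == symbol:
--             if balance == 0:
--                 results.append(i)
--     return results
-- ===== SOURCE B (Python) =====
-- def find_with_brack_balance(string: str, symbol: str,
--                                  opening: str, closing: str):
--     # Pass 1: table of running balances; bal[i] is the balance of string[:i].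
--     bal = [0]
--     for x in string:
--         bal.append(bal[-1] + (1 if x == opening else -1 if x == closing else 0))
--     # Pass 2: filter positions where the symbol stands at balance zero.
--     return [i for i, (x, b) in enumerate(zip(string, bal))
--             if x != opening and x != closing and x == symbol and b == 0]
-- ===== Notes on version B (the rewrite author's own statement) =====
-- stated objective: alternative
-- what changed: Replaces the single interleaved stateful scan with a precomputed prefix-balance table plus a separate filtering comprehension over the zipped string and table.
import Mathlib
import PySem

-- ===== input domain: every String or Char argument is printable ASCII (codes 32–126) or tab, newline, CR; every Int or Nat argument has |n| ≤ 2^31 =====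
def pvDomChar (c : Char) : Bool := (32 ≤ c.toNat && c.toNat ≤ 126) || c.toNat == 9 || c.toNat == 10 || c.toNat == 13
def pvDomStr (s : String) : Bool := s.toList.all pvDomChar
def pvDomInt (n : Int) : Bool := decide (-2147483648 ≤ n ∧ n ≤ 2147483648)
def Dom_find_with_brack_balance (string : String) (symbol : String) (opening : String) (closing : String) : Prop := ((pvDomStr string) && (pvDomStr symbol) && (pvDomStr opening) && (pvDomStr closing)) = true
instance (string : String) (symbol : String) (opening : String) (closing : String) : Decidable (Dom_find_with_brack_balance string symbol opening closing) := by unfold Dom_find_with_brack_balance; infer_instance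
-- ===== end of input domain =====

-- B replaces A's single interleaved stateful scan by a prefix-balance table plus a
-- separate filtering pass (objective: alternative decomposition of the same cost).

-- ===== PORT A =====
-- A's loop body: elif chain on x ( as a one-char string) updating (balance, results).
def pvStepA (symbol : String) (opening : String) (closing : String)
    (st : Int × List Int) (xi : Char × Nat) : Int × List Int :=
  if String.ofList [xi.1] = opening then (st.1 + 1, st.2)
  else if String.ofList [xi.1] = closing then (st.1 - 1, st.2)
  else if String.ofList [xi.1] = symbol then
    (if st.1 = 0 then (st.1, st.2 ++ [(xi.2 : Int)]) else (st.1, st.2))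
  else (st.1, st.2)

def find_with_brack_balance (string : String) (symbol : String) (opening : String) (closing : String) : List Int :=
  (string.toList.zipIdx.foldl (pvStepA symbol opening closing) (0, [])).2

-- ===== PORT B =====
-- the per-character balance increment
def pvDelta (opening : String) (closing : String) (x : Char) : Int :=
  if String.ofList [x] = opening then 1 else if String.ofList [x] = closing then -1 else 0

-- pass 1 of B: the prefix-balance table (bal in Source B), bal[i] = balance of string[:i]
def pvBal (opening : String) (closing : String) : Int → List Char → List Int
  | b, [] => [b]
  | b, x :: xs => b :: pvBal opening closing (b + pvDelta opening closing x) xs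

-- pass 2 of B: the filtering comprehension over enumerate(zip(string, bal))
def pvFilterB (symbol : String) (opening : String) (closing : String)
    (p : (Char × Int) × Nat) : Option Int :=
  if String.ofList [p.1.1] ≠ opening ∧ String.ofList [p.1.1] ≠ closing ∧
     String.ofList [p.1.1] = symbol ∧ p.1.2 = 0 then some (p.2 : Int) else none

def find_with_brack_balance_alt (string : String) (symbol : String) (opening : String) (closing : String) : List Int :=
  let cs := string.toList
  let bal := pvBal opening closing 0 cs
  ((cs.zip bal).zipIdx).filterMap (pvFilterB symbol opening closing)

-- ===== PRECONDITION & SPEC =====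
def Spec_find_with_brack_balance (string : String) (symbol : String) (opening : String) (closing : String) (out : List Int) : Prop := out = find_with_brack_balance_alt string symbol opening closing
instance (string : String) (symbol : String) (opening : String) (closing : String) (out : List Int) : Decidable (Spec_find_with_brack_balance string symbol opening closing out) := by unfold Spec_find_with_brack_balance; infer_instance

-- ===== CLAIM (what is proved, stated in full; the proofs are below) =====
def Claim_equal_find_with_brack_balance : Prop := ∀ (string : String) (symbol : String) (opening : String) (closing : String), Dom_find_with_brack_balance string symbol opening closing → Spec_find_with_brack_balance string symbol opening closing (find_with_brack_balance string symbol opening closing)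

-- ===== LEMMAS AND PROOFS =====

-- Loop invariant: A's fold from state (bal, acc) over the suffix at offset n equals
-- acc followed by B's filtering of that suffix zipped with its balance table.
theorem pvKey (symbol opening closing : String) :
    ∀ (cs : List Char) (n : Nat) (bal : Int) (acc : List Int),
      (cs.zipIdx n |>.foldl (pvStepA symbol opening closing) (bal, acc)).2
        = acc ++ ((cs.zip (pvBal opening closing bal cs)).zipIdx n).filterMap
            (pvFilterB symbol opening closing) := by
  intro cs
  induction cs with
  | nil => intro n bal acc; simp [pvBal]
  | cons x xs ih =>
    intro n bal acc
    simp only [List.zipIdx_cons, pvBal, List.zip_cons_cons, List.foldl_cons,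
      List.filterMap_cons]
    by_cases hop : String.ofList [x] = opening
    · rw [ih]
      simp [pvStepA, pvFilterB, pvDelta, hop]
    · by_cases hcl : String.ofList [x] = closing
      · have h1 : ¬(closing = opening) := fun h => hop (hcl.trans h)
        rw [ih]
        simp [pvStepA, pvFilterB, pvDelta, hcl, h1, sub_eq_add_neg]
      · by_cases hsy : String.ofList [x] = symbol
        · have h1 : ¬(symbol = opening) := fun h => hop (hsy.trans h)
          have h2 : ¬(symbol = closing) := fun h => hcl (hsy.trans h)
          by_cases hb : bal = 0
          · rw [ih]
            simp [pvStepA, pvFilterB, pvDelta, hsy, h1, h2, hb]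
          · rw [ih]
            simp [pvStepA, pvFilterB, pvDelta, hsy, h1, h2, hb]
        · rw [ih]
          simp [pvStepA, pvFilterB, pvDelta, hop, hcl, hsy]

-- ===== VERDICT (by name: the statement is the Claim_ definition above) =====
theorem find_with_brack_balance_spec : Claim_equal_find_with_brack_balance := by
  intro string symbol opening closing _
  unfold Spec_find_with_brack_balance find_with_brack_balance find_with_brack_balance_alt
  simpa using pvKey symbol opening closing string.toList 0 0 []
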